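-- pv_equiv track=rewrite | github.com/Jaloliddin418/Algoritm_Labs | Algorithm_Labs/Labs/Semester_2_Labs/exercise_lab1/Task_4/Task_4.py | longest_valid_subsequence
-- ===== SOURCE A (Python) =====
-- def is_matching(opening, closing):
--     return (opening == '(' and closing == ')') or \
--         (opening == '[' and closing == ']') or \
--         (opening == '{' and closing == '}')
--
-- def longest_valid_subsequence(s):
--     n = len(s)
--     dp = [[0] * n for _ in range(n)]
--
--     for length in range(2, n + 1):
--         for i in range(n - length + 1):
--             j = i + length - 1
--             if is_matching(s[i], s[j]):
--                 dp[i][j] = dp[i + 1][j - 1] + 2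
--             for k in range(i, j):
--                 dp[i][j] = max(dp[i][j], dp[i][k] + dp[k + 1][j])
--
--     result = []
--     i, j = 0, n - 1
--     while i <= j:
--         if i < n - 1 and dp[i][j] == dp[i + 1][j]:
--             i += 1
--         elif j > 0 and dp[i][j] == dp[i][j - 1]:
--             j -= 1
--         elif is_matching(s[i], s[j]) and dp[i][j] == dp[i + 1][j - 1] + 2:
--             result.append(s[i])
--             result.append(s[j])
--             i += 1
--             j -= 1
--         else:
--             for k in range(i, j):
--                 if dp[i][j] == dp[i][k] + dp[k + 1][j]:
--                     j = k
--                     break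
--     return ''.join(result)
-- ===== SOURCE B (Python) =====
-- def is_matching(opening, closing):
--     return (opening == '(' and closing == ')') or \
--         (opening == '[' and closing == ']') or \
--         (opening == '{' and closing == '}')
--
-- def longest_valid_subsequence(s):
--     n = len(s)
--     memo = {}
--
--     def solve(i, j):
--         if j <= i:
--             return 0
--         hit = memo.get((i, j))
--         if hit is not None:
--             return hit
--         best = solve(i + 1, j - 1) + 2 if is_matching(s[i], s[j]) else 0
--         for k in range(i, j):
--             best = max(best, solve(i, k) + solve(k + 1, j))
--         memo[(i, j)] = best
--         return best
--
--     # prime the whole table (increasing j, decreasing i keeps recursion shallow)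
--     for j in range(n):
--         for i in range(j, -1, -1):
--             solve(i, j)
--
--     def dp(i, j):
--         return memo.get((i, j), 0)
--
--     result = []
--     i, j = 0, n - 1
--     while i <= j:
--         if i < n - 1 and dp(i, j) == dp(i + 1, j):
--             i += 1
--         elif j > 0 and dp(i, j) == dp(i, j - 1):
--             j -= 1
--         elif is_matching(s[i], s[j]) and dp(i, j) == dp(i + 1, j - 1) + 2:
--             result.append(s[i])
--             result.append(s[j])
--             i += 1
--             j -= 1
--         else:
--             for k in range(i, j):
--                 if dp(i, j) == dp(i, k) + dp(k + 1, j):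
--                     j = k
--                     break
--     return ''.join(result)
-- ===== Notes on version B (the rewrite author's own statement) =====
-- stated objective: alternative
-- what changed: The bottom-up length-ordered triple loop filling a 2D list is replaced by a top-down memoized recursive solve(i,j) over intervals caching in a dict, primed cell by cell; the identical traceback loop then reads the memo dict (on length-1 input both versions inherit A's infinite traceback loop).
import Mathlib
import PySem

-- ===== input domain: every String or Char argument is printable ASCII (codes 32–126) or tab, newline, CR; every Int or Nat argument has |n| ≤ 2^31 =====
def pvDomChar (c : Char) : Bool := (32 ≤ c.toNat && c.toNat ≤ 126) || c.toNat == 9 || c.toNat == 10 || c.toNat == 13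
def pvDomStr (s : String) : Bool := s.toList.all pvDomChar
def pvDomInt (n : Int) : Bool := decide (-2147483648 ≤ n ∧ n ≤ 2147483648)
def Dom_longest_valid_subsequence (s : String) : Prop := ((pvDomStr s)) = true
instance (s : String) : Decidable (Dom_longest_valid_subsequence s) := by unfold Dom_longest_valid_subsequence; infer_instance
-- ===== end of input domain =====

-- A fills the interval dp table bottom-up with a length-ordered triple loop into a 2D list;
-- B computes the same table by a top-down memoized recursion solve(i,j) cached in a dict,
-- and both run the identical traceback loop over the finished table (objective: alternative).
-- On length-1 strings both Pythons loop forever in the shared traceback (no branch fires); the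
-- ports' fuel then returns the accumulator in both, so the equivalence is total.


-- ===== PORT A =====
-- is_matching
def pvMatch (o c : Char) : Bool :=
  (o == '(' && c == ')') || (o == '[' && c == ']') || (o == '{' && c == '}')

-- s[i]; every read of both programs is in range, so the default is never returned
def pvGetC (l : List Char) (i : Nat) : Char := l.getD i ' '

-- dp[a][b] read / dp[i][j] = v write on the 2D list (all accesses are in range)
def pvGet2 (dp : List (List Int)) (a b : Nat) : Int := (dp.getD a []).getD b 0
def pvSet2 (dp : List (List Int)) (i j : Nat) (v : Int) : List (List Int) :=
  dp.set i ((dp.getD i []).set j v)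

-- body of A's two inner statements for one cell (i, j): the matching assignment, then the k loop
def pvCell (l : List Char) (dp : List (List Int)) (i j : Nat) : List (List Int) :=
  let dp := if pvMatch (pvGetC l i) (pvGetC l j)
            then pvSet2 dp i j (pvGet2 dp (i+1) (j-1) + 2) else dp
  (List.range' i (j - i)).foldl
    (fun dp k => pvSet2 dp i j (max (pvGet2 dp i j) (pvGet2 dp i k + pvGet2 dp (k+1) j))) dp

-- A's triple loop: for length in range(2, n+1): for i in range(n-length+1): …
def pvDpA (l : List Char) : List (List Int) :=
  (List.range' 2 (l.length - 1)).foldl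
    (fun dp length =>
      (List.range (l.length - length + 1)).foldl
        (fun dp i => pvCell l dp i (i + length - 1)) dp)
    (List.replicate l.length (List.replicate l.length 0))

-- the traceback while-loop, shared verbatim by both programs; i, j are Python ints
-- (fuel only makes the loop total: on every input admitted by Pre_ it is never exhausted;
--  dp reads use toNat: every read inside the loop has 0 ≤ i ≤ j, as in the Python)
def pvTrace (l : List Char) (n : Nat) (dp : Nat → Nat → Int) :
    Nat → Int → Int → List Char → List Char
  | 0, _, _, acc => acc
  | f+1, i, j, acc =>
    if j < i then acc else
    let a := i.toNat; let b := j.toNat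
    if i < (n : Int) - 1 ∧ dp a b = dp (a+1) b then
      pvTrace l n dp f (i+1) j acc
    else if 0 < j ∧ dp a b = dp a (b-1) then
      pvTrace l n dp f i (j-1) acc
    else if pvMatch (pvGetC l a) (pvGetC l b) ∧ dp a b = dp (a+1) (b-1) + 2 then
      pvTrace l n dp f (i+1) (j-1) (acc ++ [pvGetC l a, pvGetC l b])
    else
      match (List.range' a (b - a)).find? (fun k => dp a b = dp a k + dp (k+1) b) with
      | some k => pvTrace l n dp f i (k : Int) acc
      | none => acc   -- the Python loops forever here (reachable only on length-1 input)

def longest_valid_subsequence (s : String) : String :=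
  let l := s.toList
  let n := l.length
  let dp := pvDpA l
  String.ofList (pvTrace l n (fun a b => pvGet2 dp a b) (n + 2) 0 ((n : Int) - 1) [])

-- ===== PORT B =====
-- B's memoized recursive solve(i, j), threading the memo dict; fuel > j - i suffices
def pvSolve (l : List Char) :
    Nat → PySem.Dict (Nat × Nat) Int → Nat → Nat → Int × PySem.Dict (Nat × Nat) Int
  | 0, c, _, _ => (0, c)
  | f+1, c, i, j =>
    if j ≤ i then (0, c) else
    match c.get? (i, j) with
    | some v => (v, c)
    | none =>
      let p :=
        if pvMatch (pvGetC l i) (pvGetC l j) then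
          let q := pvSolve l f c (i+1) (j-1); (q.1 + 2, q.2)
        else (0, c)
      let r :=
        (List.range' i (j - i)).foldl
          (fun (p : Int × PySem.Dict (Nat × Nat) Int) k =>
            let q := pvSolve l f p.2 i k
            let q' := pvSolve l f q.2 (k+1) j
            (max p.1 (q.1 + q'.1), q'.2)) p
      (r.1, r.2.insert (i, j) r.1)

-- B's priming loop: for j in range(n): for i in range(j, -1, -1): solve(i, j)
def pvCacheB (l : List Char) : PySem.Dict (Nat × Nat) Int :=
  (List.range l.length).foldl
    (fun c j => ((List.range (j+1)).reverse).foldl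
      (fun c i => (pvSolve l (l.length + 1) c i j).2) c)
    PySem.Dict.empty

def longest_valid_subsequence_alt (s : String) : String :=
  let l := s.toList
  let n := l.length
  let c := pvCacheB l
  String.ofList (pvTrace l n (fun a b => c.getD (a, b) 0) (n + 2) 0 ((n : Int) - 1) [])

-- ===== PRECONDITION & SPEC =====
def Spec_longest_valid_subsequence (s : String) (out : String) : Prop := out = longest_valid_subsequence_alt s
instance (s : String) (out : String) : Decidable (Spec_longest_valid_subsequence s out) := by unfold Spec_longest_valid_subsequence; infer_instance

-- ===== CLAIM (what is proved, stated in full; the proofs are below) =====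
def Claim_equal_longest_valid_subsequence : Prop := ∀ (s : String), Dom_longest_valid_subsequence s → Spec_longest_valid_subsequence s (longest_valid_subsequence s)

-- ===== LEMMAS AND PROOFS =====

-- the interval recurrence both programs compute, fuel-indexed
def pvF (l : List Char) : Nat → Nat → Nat → Int
  | 0, _, _ => 0
  | f+1, i, j =>
    if j ≤ i then 0 else
      (List.range' i (j - i)).foldl
        (fun acc k => max acc (pvF l f i k + pvF l f (k+1) j))
        (if pvMatch (pvGetC l i) (pvGetC l j) then pvF l f (i+1) (j-1) + 2 else 0)

def pvFc (l : List Char) (i j : Nat) : Int := pvF l (j - i + 1) i j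

theorem pvF_stable (l : List Char) :
    ∀ f g i j, j - i < f → j - i < g → pvF l f i j = pvF l g i j := by
  intro f
  induction f with
  | zero => intro g i j h; omega
  | succ f ih =>
    intro g i j hf hg
    cases g with
    | zero => omega
    | succ g =>
      simp only [pvF]
      by_cases hij : j ≤ i
      · simp [hij]
      · simp only [if_neg hij]
        have hlt : i < j := by omega
        have hinit : (if pvMatch (pvGetC l i) (pvGetC l j) then pvF l f (i+1) (j-1) + 2 else 0)
            = (if pvMatch (pvGetC l i) (pvGetC l j) then pvF l g (i+1) (j-1) + 2 else 0) := by
          by_cases hm : pvMatch (pvGetC l i) (pvGetC l j)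
          · simp only [if_pos hm]
            rw [ih g (i+1) (j-1) (by omega) (by omega)]
          · simp [hm]
        rw [hinit]
        apply PySem.List.foldl_congr_mem
        intro acc k hk
        have hk' : i ≤ k ∧ k < j := by
          have := List.mem_range'.mp hk
          omega
        rw [ih g i k (by omega) (by omega), ih g (k+1) j (by omega) (by omega)]

theorem pvFc_of_le (l : List Char) (i j : Nat) (h : j ≤ i) : pvFc l i j = 0 := by
  have : j - i + 1 = 1 := by omega
  simp [pvFc, pvF, h]

theorem pvFc_unfold (l : List Char) (i j : Nat) (h : i < j) :
    pvFc l i j =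
      (List.range' i (j - i)).foldl
        (fun acc k => max acc (pvFc l i k + pvFc l (k+1) j))
        (if pvMatch (pvGetC l i) (pvGetC l j) then pvFc l (i+1) (j-1) + 2 else 0) := by
  show pvF l (j - i + 1) i j = _
  simp only [pvFc]
  conv_lhs => rw [pvF]
  rw [if_neg (by omega : ¬ j ≤ i)]
  have hinit : (if pvMatch (pvGetC l i) (pvGetC l j) then pvF l (j-i) (i+1) (j-1) + 2 else 0)
      = (if pvMatch (pvGetC l i) (pvGetC l j) then pvF l ((j-1)-(i+1)+1) (i+1) (j-1) + 2 else 0) := by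
    by_cases hm : pvMatch (pvGetC l i) (pvGetC l j)
    · simp only [if_pos hm]; rw [pvF_stable l (j-i) ((j-1)-(i+1)+1) (i+1) (j-1) (by omega) (by omega)]
    · simp [hm]
  rw [hinit]
  apply PySem.List.foldl_congr_mem
  intro acc k hk
  have hk' : i ≤ k ∧ k < j := by
    have := List.mem_range'.mp hk
    omega
  rw [pvF_stable l (j-i) (k-i+1) i k (by omega) (by omega),
      pvF_stable l (j-i) (j-(k+1)+1) (k+1) j (by omega) (by omega)]

theorem pvGet2_set2 (dp : List (List Int)) (i j : Nat) (v : Int) (a b : Nat)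
    (hi : i < dp.length) (hj : j < (dp.getD i []).length) :
    pvGet2 (pvSet2 dp i j v) a b = if a = i ∧ b = j then v else pvGet2 dp a b := by
  unfold pvGet2 pvSet2
  simp only [List.getD_eq_getElem?_getD] at hj ⊢
  by_cases ha : a = i
  · subst ha
    rw [List.getElem?_set_self (by omega)]
    by_cases hb : b = j
    · subst hb
      simp [List.getElem?_set_self hj]
    · simp [List.getElem?_set_ne (by omega : j ≠ b), hb]
  · rw [List.getElem?_set_ne (by omega : i ≠ a)]
    simp [ha]

theorem pvShape_set2 (dp : List (List Int)) (n i j : Nat) (v : Int)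
    (hi : i < dp.length)
    (h : dp.length = n ∧ ∀ r ∈ dp, r.length = n) :
    (pvSet2 dp i j v).length = n ∧ ∀ r ∈ (pvSet2 dp i j v), r.length = n := by
  obtain ⟨h1, h2⟩ := h
  refine ⟨by simp [pvSet2, h1], ?_⟩
  intro r hr
  rcases List.mem_or_eq_of_mem_set hr with hmem | rfl
  · exact h2 r hmem
  · rw [List.length_set]
    have : dp.getD i [] = dp[i] := by
      simp [List.getD_eq_getElem?_getD, List.getElem?_eq_getElem hi]
    rw [this]
    exact h2 _ (List.getElem_mem hi)

theorem pvFoldK (l : List Char) (dp0 : List (List Int)) (i j : Nat)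
    (hij : i < j) (hjn : j < l.length)
    (H : ∀ a b, b < l.length → b - a < j - i → pvGet2 dp0 a b = pvFc l a b) :
    ∀ ks : List Nat, (∀ k ∈ ks, i ≤ k ∧ k < j) →
    ∀ (dpc : List (List Int)) (acc0 : Int),
      (dpc.length = l.length ∧ ∀ r ∈ dpc, r.length = l.length) →
      (∀ a b, pvGet2 dpc a b = if a = i ∧ b = j then acc0 else pvGet2 dp0 a b) →
      (∀ a b, pvGet2 (ks.foldl
          (fun dp k => pvSet2 dp i j (max (pvGet2 dp i j) (pvGet2 dp i k + pvGet2 dp (k+1) j))) dpc) a b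
        = if a = i ∧ b = j
          then ks.foldl (fun acc k => max acc (pvFc l i k + pvFc l (k+1) j)) acc0
          else pvGet2 dp0 a b)
      ∧ (((ks.foldl
          (fun dp k => pvSet2 dp i j (max (pvGet2 dp i j) (pvGet2 dp i k + pvGet2 dp (k+1) j))) dpc)).length = l.length
         ∧ ∀ r ∈ (ks.foldl
          (fun dp k => pvSet2 dp i j (max (pvGet2 dp i j) (pvGet2 dp i k + pvGet2 dp (k+1) j))) dpc), r.length = l.length) := by
  intro ks
  induction ks with
  | nil => intro _ dpc acc0 hs hget; exact ⟨hget, hs⟩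
  | cons k ks ih =>
    intro hks dpc acc0 hs hget
    have hk := hks k (by simp)
    have hidp : i < dpc.length := by omega
    have hrow : j < (dpc.getD i []).length := by
      have : dpc.getD i [] = dpc[i] := by
        simp [List.getD_eq_getElem?_getD, List.getElem?_eq_getElem hidp]
      rw [this, hs.2 _ (List.getElem_mem hidp)]; omega
    simp only [List.foldl_cons]
    have hread1 : pvGet2 dpc i j = acc0 := by rw [hget]; simp
    have hread2 : pvGet2 dpc i k = pvFc l i k := by
      rw [hget]
      rw [if_neg (by omega)]
      exact H i k (by omega) (by omega)
    have hread3 : pvGet2 dpc (k+1) j = pvFc l (k+1) j := by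
      rw [hget]
      rw [if_neg (by omega)]
      exact H (k+1) j (by omega) (by omega)
    rw [hread1, hread2, hread3]
    exact ih (fun k' hk' => hks k' (by simp [hk'])) _ _
      (pvShape_set2 _ _ _ _ _ hidp hs)
      (fun a b => by
        rw [pvGet2_set2 _ _ _ _ _ _ hidp hrow]
        by_cases hab : a = i ∧ b = j
        · simp [hab]
        · rw [if_neg hab, if_neg hab, hget, if_neg hab])

theorem pvCell_spec (l : List Char) (dp : List (List Int)) (i j : Nat)
    (hs : dp.length = l.length ∧ ∀ r ∈ dp, r.length = l.length)
    (hij : i < j) (hjn : j < l.length)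
    (H : ∀ a b, b < l.length → b - a < j - i → pvGet2 dp a b = pvFc l a b)
    (H0 : pvGet2 dp i j = 0) :
    (∀ a b, pvGet2 (pvCell l dp i j) a b
        = if a = i ∧ b = j then pvFc l i j else pvGet2 dp a b)
    ∧ ((pvCell l dp i j).length = l.length ∧ ∀ r ∈ pvCell l dp i j, r.length = l.length) := by
  have hidp : i < dp.length := by omega
  have hrow : j < (dp.getD i []).length := by
    have : dp.getD i [] = dp[i] := by
      simp [List.getD_eq_getElem?_getD, List.getElem?_eq_getElem hidp]
    rw [this, hs.2 _ (List.getElem_mem hidp)]; omega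
  unfold pvCell
  set v0 : Int := if pvMatch (pvGetC l i) (pvGetC l j) then pvFc l (i+1) (j-1) + 2 else 0 with hv0
  have step1 :
      (∀ a b, pvGet2 (if pvMatch (pvGetC l i) (pvGetC l j)
          then pvSet2 dp i j (pvGet2 dp (i+1) (j-1) + 2) else dp) a b
        = if a = i ∧ b = j then v0 else pvGet2 dp a b)
      ∧ (((if pvMatch (pvGetC l i) (pvGetC l j)
          then pvSet2 dp i j (pvGet2 dp (i+1) (j-1) + 2) else dp)).length = l.length
        ∧ ∀ r ∈ (if pvMatch (pvGetC l i) (pvGetC l j)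
          then pvSet2 dp i j (pvGet2 dp (i+1) (j-1) + 2) else dp), r.length = l.length) := by
    by_cases hm : pvMatch (pvGetC l i) (pvGetC l j)
    · simp only [if_pos hm]
      refine ⟨fun a b => ?_, pvShape_set2 _ _ _ _ _ hidp hs⟩
      rw [pvGet2_set2 _ _ _ _ _ _ hidp hrow]
      have : pvGet2 dp (i+1) (j-1) = pvFc l (i+1) (j-1) := H _ _ (by omega) (by omega)
      rw [this, hv0, if_pos hm]
    · simp only [if_neg hm]
      refine ⟨fun a b => ?_, hs⟩
      rw [hv0, if_neg hm]
      by_cases hab : a = i ∧ b = j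
      · obtain ⟨rfl, rfl⟩ := hab; simp [H0]
      · rw [if_neg hab]
  obtain ⟨hget1, hs1⟩ := step1
  have hmem : ∀ k ∈ List.range' i (j - i), i ≤ k ∧ k < j := by
    intro k hk; have := List.mem_range'.mp hk; omega
  have := pvFoldK l dp i j hij hjn H (List.range' i (j-i)) hmem _ v0 hs1 hget1
  refine ⟨fun a b => ?_, this.2⟩
  rw [this.1]
  by_cases hab : a = i ∧ b = j
  · rw [if_pos hab, if_pos hab, ← pvFc_unfold l i j hij]
  · rw [if_neg hab, if_neg hab]

theorem pvGet2_init (n a b : Nat) :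
    pvGet2 (List.replicate n (List.replicate n (0:Int))) a b = 0 := by
  simp only [pvGet2, List.getD_eq_getElem?_getD, List.getElem?_replicate]
  by_cases ha : a < n
  · simp only [if_pos ha, Option.getD_some]
    by_cases hb : b < n <;> simp [hb]
  · simp [ha]

theorem pvInner (l : List Char) (L : Nat) (hL : 2 ≤ L) :
    ∀ is : List Nat, is.Nodup → (∀ i ∈ is, i + L ≤ l.length) →
    ∀ dp : List (List Int),
      (dp.length = l.length ∧ ∀ r ∈ dp, r.length = l.length) →
      (∀ a b, pvGet2 dp a b
        = if a < b ∧ b < l.length ∧ (b+1 < a+L ∨ (b+1 = a+L ∧ a+L ≤ l.length ∧ a ∉ is))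
          then pvFc l a b else 0) →
      (((is.foldl (fun dp i => pvCell l dp i (i + L - 1)) dp).length = l.length
          ∧ ∀ r ∈ is.foldl (fun dp i => pvCell l dp i (i + L - 1)) dp, r.length = l.length)
        ∧ ∀ a b, pvGet2 (is.foldl (fun dp i => pvCell l dp i (i + L - 1)) dp) a b
        = if a < b ∧ b < l.length ∧ (b+1 < a+L ∨ (b+1 = a+L ∧ a+L ≤ l.length))
          then pvFc l a b else 0) := by
  intro is
  induction is with
  | nil =>
    intro _ _ dp hs hinv
    refine ⟨hs, fun a b => ?_⟩
    simp only [List.foldl_nil]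
    rw [hinv a b]
    congr 2
    simp
  | cons i0 ks ih =>
    intro hnd hmem dp hs hinv
    have hi0n : i0 + L ≤ l.length := hmem i0 (by simp)
    have hij : i0 < i0 + L - 1 := by omega
    have hjn : i0 + L - 1 < l.length := by omega
    have H : ∀ a b, b < l.length → b - a < (i0 + L - 1) - i0 → pvGet2 dp a b = pvFc l a b := by
      intro a b hb hba
      rw [hinv a b]
      by_cases hab : a < b
      · rw [if_pos ⟨hab, hb, Or.inl (by omega)⟩]
      · rw [if_neg (by tauto), pvFc_of_le l a b (by omega)]
    have H0 : pvGet2 dp i0 (i0 + L - 1) = 0 := by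
      rw [hinv]
      rw [if_neg]
      rintro ⟨h1, h2, h3 | ⟨h4, h5, h6⟩⟩
      · omega
      · exact h6 (by simp)
    obtain ⟨hcg, hcs⟩ := pvCell_spec l dp i0 (i0 + L - 1) hs hij hjn H H0
    simp only [List.foldl_cons]
    apply ih (by exact hnd.of_cons) (fun k hk => hmem k (by simp [hk])) _ hcs
    intro a b
    rw [hcg a b]
    by_cases hab : a = i0 ∧ b = i0 + L - 1
    · obtain ⟨rfl, rfl⟩ := hab
      rw [if_pos (⟨rfl, rfl⟩ : a = a ∧ _)]
      rw [if_pos]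
      refine ⟨by omega, by omega, Or.inr ⟨by omega, by omega, ?_⟩⟩
      exact (List.nodup_cons.mp hnd).1
    · rw [if_neg hab, hinv a b]
      congr 1
      simp only [List.mem_cons, eq_iff_iff]
      constructor
      · rintro ⟨h1, h2, h3 | ⟨h4, h5, h6⟩⟩
        · exact ⟨h1, h2, Or.inl h3⟩
        · exact ⟨h1, h2, Or.inr ⟨h4, h5, fun hm => h6 (Or.inr hm)⟩⟩
      · rintro ⟨h1, h2, h3 | ⟨h4, h5, h6⟩⟩
        · exact ⟨h1, h2, Or.inl h3⟩
        · refine ⟨h1, h2, Or.inr ⟨h4, h5, ?_⟩⟩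
          rintro (rfl | hm)
          · exact hab ⟨rfl, by omega⟩
          · exact h6 hm

theorem pvOuter (l : List Char) :
    ∀ m, m ≤ l.length - 1 →
    (((((List.range' 2 m).foldl
        (fun dp length =>
          (List.range (l.length - length + 1)).foldl
            (fun dp i => pvCell l dp i (i + length - 1)) dp)
        (List.replicate l.length (List.replicate l.length 0)))).length = l.length
      ∧ ∀ r ∈ ((List.range' 2 m).foldl
        (fun dp length =>
          (List.range (l.length - length + 1)).foldl
            (fun dp i => pvCell l dp i (i + length - 1)) dp)
        (List.replicate l.length (List.replicate l.length 0))), r.length = l.length)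
    ∧ ∀ a b, pvGet2 ((List.range' 2 m).foldl
        (fun dp length =>
          (List.range (l.length - length + 1)).foldl
            (fun dp i => pvCell l dp i (i + length - 1)) dp)
        (List.replicate l.length (List.replicate l.length 0))) a b
      = if a < b ∧ b < l.length ∧ b + 1 ≤ a + (m + 1) then pvFc l a b else 0) := by
  intro m
  induction m with
  | zero =>
    intro _
    simp only [List.range'_zero, List.foldl_nil]
    refine ⟨⟨by simp, by intro r hr; simp_all [List.eq_of_mem_replicate hr]⟩, fun a b => ?_⟩
    rw [pvGet2_init]
    rw [if_neg (by omega)]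
  | succ m ih =>
    intro hm
    have hmm : m ≤ l.length - 1 := by omega
    obtain ⟨hs, hinv⟩ := ih hmm
    have hcat : List.range' 2 (m+1) = List.range' 2 m ++ [2+m] := by
      simpa using List.range'_concat (s := 2) (n := m) (step := 1)
    rw [hcat, List.foldl_append, List.foldl_cons, List.foldl_nil]
    set L := 2 + m with hLdef
    have hL : 2 ≤ L := by omega
    have hLn : L ≤ l.length := by omega
    have hstep := pvInner l L hL (List.range (l.length - L + 1)) (List.nodup_range)
      (fun i hi => by have := List.mem_range.mp hi; omega)
      _ hs
      (fun a b => by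
        rw [hinv a b]
        by_cases h1 : a < b ∧ b < l.length
        · by_cases h3 : b + 1 ≤ a + (m+1)
          · rw [if_pos ⟨h1.1, h1.2, h3⟩, if_pos ⟨h1.1, h1.2, Or.inl (by omega)⟩]
          · rw [if_neg (by rintro ⟨_, _, hc⟩; omega), if_neg]
            rintro ⟨_, _, hc | ⟨hc1, hc2, hc3⟩⟩
            · omega
            · exact hc3 (List.mem_range.mpr (by omega))
        · rw [if_neg (by tauto), if_neg (by tauto)])
    obtain ⟨hs2, hinv2⟩ := hstep
    refine ⟨hs2, fun a b => ?_⟩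
    rw [hinv2 a b]
    by_cases h1 : a < b ∧ b < l.length
    · by_cases h3 : b + 1 ≤ a + (m + 1 + 1)
      · rw [if_pos, if_pos ⟨h1.1, h1.2, h3⟩]
        by_cases h4 : b + 1 < a + L
        · exact ⟨h1.1, h1.2, Or.inl h4⟩
        · exact ⟨h1.1, h1.2, Or.inr ⟨by omega, by omega⟩⟩
      · rw [if_neg, if_neg (by rintro ⟨_, _, hc⟩; omega)]
        rintro ⟨_, _, hc | ⟨hc1, hc2⟩⟩ <;> omega
    · rw [if_neg (by tauto), if_neg (by tauto)]

theorem pvDpA_eq (l : List Char) (a b : Nat) :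
    pvGet2 (pvDpA l) a b = if a < b ∧ b < l.length then pvFc l a b else 0 := by
  unfold pvDpA
  rw [(pvOuter l (l.length - 1) le_rfl).2 a b]
  by_cases h1 : a < b ∧ b < l.length
  · rw [if_pos ⟨h1.1, h1.2, by omega⟩, if_pos h1]
  · rw [if_neg (by tauto), if_neg h1]

def pvCacheOK (l : List Char) (c : PySem.Dict (Nat × Nat) Int) : Prop :=
  ∀ p v, c.get? p = some v → v = pvFc l p.1 p.2 ∧ p.1 < p.2 ∧ p.2 < l.length

theorem pvSolve_correct (l : List Char) :
    ∀ f c i j, j - i < f → j < l.length → pvCacheOK l c →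
      (pvSolve l f c i j).1 = pvFc l i j
      ∧ pvCacheOK l (pvSolve l f c i j).2
      ∧ (∀ p v, c.get? p = some v → (pvSolve l f c i j).2.get? p = some v)
      ∧ (i < j → (pvSolve l f c i j).2.get? (i, j) = some (pvFc l i j)) := by
  intro f
  induction f with
  | zero => intro c i j h; omega
  | succ f ih =>
    intro c i j hf hjn hOK
    by_cases hij : j ≤ i
    · simp only [pvSolve, if_pos hij]
      exact ⟨(pvFc_of_le l i j hij).symm, hOK, fun p v h => h, fun h => absurd h (by omega)⟩
    · have hlt : i < j := by omega
      cases hget : PySem.Dict.get? c (i, j) with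
      | some v =>
        simp only [pvSolve, if_neg hij, hget]
        have h2 := hOK (i, j) v hget
        have hv : v = pvFc l i j := h2.1
        exact ⟨hv, hOK, fun p v h => h, fun _ => by rw [hv]⟩
      | none =>
        -- the match step
        have hstep :
            (if pvMatch (pvGetC l i) (pvGetC l j) then
              let q := pvSolve l f c (i+1) (j-1); (q.1 + 2, q.2)
            else ((0 : Int), c)).1
              = (if pvMatch (pvGetC l i) (pvGetC l j) then pvFc l (i+1) (j-1) + 2 else 0)
            ∧ pvCacheOK l (if pvMatch (pvGetC l i) (pvGetC l j) then
              let q := pvSolve l f c (i+1) (j-1); (q.1 + 2, q.2)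
            else ((0 : Int), c)).2
            ∧ (∀ p v, c.get? p = some v →
                (if pvMatch (pvGetC l i) (pvGetC l j) then
                  let q := pvSolve l f c (i+1) (j-1); (q.1 + 2, q.2)
                else ((0 : Int), c)).2.get? p = some v) := by
          by_cases hm : pvMatch (pvGetC l i) (pvGetC l j)
          · simp only [if_pos hm]
            obtain ⟨h1, h2, h3, _⟩ := ih c (i+1) (j-1) (by omega) (by omega) hOK
            exact ⟨by simp [h1], h2, h3⟩
          · simp only [if_neg hm]
            exact ⟨by simp, hOK, fun p v h => h⟩

        set p0 := (if pvMatch (pvGetC l i) (pvGetC l j) then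
              let q := pvSolve l f c (i+1) (j-1); (q.1 + 2, q.2)
            else ((0 : Int), c)) with hp0
        obtain ⟨hp1, hp2, hp3⟩ := hstep
        -- the k fold
        have hfold : ∀ ks : List Nat, (∀ k ∈ ks, i ≤ k ∧ k < j) →
            ∀ (st : Int × PySem.Dict (Nat × Nat) Int), pvCacheOK l st.2 →
            (ks.foldl
              (fun (p : Int × PySem.Dict (Nat × Nat) Int) k =>
                let q := pvSolve l f p.2 i k
                let q' := pvSolve l f q.2 (k+1) j
                (max p.1 (q.1 + q'.1), q'.2)) st).1
              = ks.foldl (fun acc k => max acc (pvFc l i k + pvFc l (k+1) j)) st.1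
            ∧ pvCacheOK l (ks.foldl
              (fun (p : Int × PySem.Dict (Nat × Nat) Int) k =>
                let q := pvSolve l f p.2 i k
                let q' := pvSolve l f q.2 (k+1) j
                (max p.1 (q.1 + q'.1), q'.2)) st).2
            ∧ (∀ p v, st.2.get? p = some v → (ks.foldl
              (fun (p : Int × PySem.Dict (Nat × Nat) Int) k =>
                let q := pvSolve l f p.2 i k
                let q' := pvSolve l f q.2 (k+1) j
                (max p.1 (q.1 + q'.1), q'.2)) st).2.get? p = some v) := by
          intro ks
          induction ks with
          | nil => intro _ st hst; exact ⟨rfl, hst, fun p v h => h⟩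
          | cons k ks ihk =>
            intro hks st hst
            have hk := hks k (by simp)
            obtain ⟨ha1, ha2, ha3, _⟩ := ih st.2 i k (by omega) (by omega) hst
            obtain ⟨hb1, hb2, hb3, _⟩ := ih (pvSolve l f st.2 i k).2 (k+1) j (by omega) (by omega) ha2
            simp only [List.foldl_cons]
            obtain ⟨hc1, hc2, hc3⟩ := ihk (fun k' hk' => hks k' (by simp [hk']))
              ((max st.1 ((pvSolve l f st.2 i k).1 + (pvSolve l f (pvSolve l f st.2 i k).2 (k+1) j).1),
                (pvSolve l f (pvSolve l f st.2 i k).2 (k+1) j).2)) hb2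
            refine ⟨?_, hc2, ?_⟩
            · rw [hc1]; simp only [ha1, hb1]
            · intro p v hv
              exact hc3 p v (hb3 p v (ha3 p v hv))
        obtain ⟨hf1, hf2, hf3⟩ := hfold (List.range' i (j - i))
          (fun k hk => by have := List.mem_range'.mp hk; omega) p0 hp2
        simp only [pvSolve, if_neg hij, hget]
        have hval : (List.foldl
              (fun (p : Int × PySem.Dict (Nat × Nat) Int) k =>
                let q := pvSolve l f p.2 i k
                let q' := pvSolve l f q.2 (k+1) j
                (max p.1 (q.1 + q'.1), q'.2)) p0 (List.range' i (j - i))).1 = pvFc l i j := by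
          rw [hf1, hp1, ← pvFc_unfold l i j hlt]
        refine ⟨hval, ?_, ?_, ?_⟩
        · intro p v hv
          rw [PySem.Dict.get?_insert] at hv
          split at hv
          · rename_i hpe
            subst hpe
            cases hv
            rw [hval]
            exact ⟨rfl, hlt, hjn⟩
          · exact hf2 p v hv
        · intro p v hv
          rw [PySem.Dict.get?_insert]
          split
          · rename_i hpe; subst hpe; rw [hv] at hget; cases hget
          · exact hf3 p v (hp3 p v hv)
        · intro _
          rw [PySem.Dict.get?_insert, if_pos rfl, hval]

theorem pvPrimeInner (l : List Char) (j : Nat) (hjn : j < l.length) :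
    ∀ is : List Nat, ∀ c0, pvCacheOK l c0 →
      pvCacheOK l (is.foldl (fun c i => (pvSolve l (l.length + 1) c i j).2) c0)
      ∧ (∀ p v, c0.get? p = some v →
          (is.foldl (fun c i => (pvSolve l (l.length + 1) c i j).2) c0).get? p = some v)
      ∧ (∀ i ∈ is, i < j →
          (is.foldl (fun c i => (pvSolve l (l.length + 1) c i j).2) c0).get? (i, j)
            = some (pvFc l i j)) := by
  intro is
  induction is with
  | nil => intro c0 h; exact ⟨h, fun p v h => h, by simp⟩
  | cons i0 rest ih =>
    intro c0 hOK
    obtain ⟨h1, h2, h3, h4⟩ := pvSolve_correct l (l.length + 1) c0 i0 j (by omega) hjn hOK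
    simp only [List.foldl_cons]
    obtain ⟨g1, g2, g3⟩ := ih _ h2
    refine ⟨g1, fun p v hv => g2 p v (h3 p v hv), ?_⟩
    intro i hi hij
    rcases List.mem_cons.mp hi with hi | hi
    · subst hi
      exact g2 _ _ (h4 hij)
    · exact g3 i hi hij

theorem pvPrimeOuter (l : List Char) :
    ∀ js : List Nat, (∀ j ∈ js, j < l.length) → ∀ c0, pvCacheOK l c0 →
      pvCacheOK l (js.foldl (fun c j => ((List.range (j+1)).reverse).foldl
          (fun c i => (pvSolve l (l.length + 1) c i j).2) c) c0)
      ∧ (∀ p v, c0.get? p = some v →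
          (js.foldl (fun c j => ((List.range (j+1)).reverse).foldl
            (fun c i => (pvSolve l (l.length + 1) c i j).2) c) c0).get? p = some v)
      ∧ (∀ j ∈ js, ∀ i, i < j →
          (js.foldl (fun c j => ((List.range (j+1)).reverse).foldl
            (fun c i => (pvSolve l (l.length + 1) c i j).2) c) c0).get? (i, j)
            = some (pvFc l i j)) := by
  intro js
  induction js with
  | nil => intro _ c0 h; exact ⟨h, fun p v h => h, by simp⟩
  | cons j0 rest ih =>
    intro hjs c0 hOK
    have hj0 : j0 < l.length := hjs j0 (by simp)
    obtain ⟨h1, h2, h3⟩ := pvPrimeInner l j0 hj0 ((List.range (j0+1)).reverse) c0 hOK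
    simp only [List.foldl_cons]
    obtain ⟨g1, g2, g3⟩ := ih (fun j hj => hjs j (by simp [hj])) _ h1
    refine ⟨g1, fun p v hv => g2 p v (h2 p v hv), ?_⟩
    intro j hj i hij
    rcases List.mem_cons.mp hj with hj | hj
    · subst hj
      exact g2 _ _ (h3 i (by simp [List.mem_range]; omega) hij)
    · exact g3 j hj i hij

theorem pvCacheB_eq (l : List Char) (a b : Nat) :
    (pvCacheB l).getD (a, b) 0 = if a < b ∧ b < l.length then pvFc l a b else 0 := by
  have hempty : pvCacheOK l PySem.Dict.empty := by
    intro p v hv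
    rw [PySem.Dict.get?_empty] at hv
    cases hv
  obtain ⟨h1, h2, h3⟩ := pvPrimeOuter l (List.range l.length)
    (fun j hj => List.mem_range.mp hj) PySem.Dict.empty hempty
  unfold pvCacheB
  by_cases hab : a < b ∧ b < l.length
  · rw [if_pos hab, PySem.Dict.getD_eq_get?_getD,
      h3 b (List.mem_range.mpr hab.2) a hab.1, Option.getD_some]
  · rw [if_neg hab, PySem.Dict.getD_eq_get?_getD]
    cases hq : (((List.range l.length)).foldl (fun c j => ((List.range (j+1)).reverse).foldl
        (fun c i => (pvSolve l (l.length + 1) c i j).2) c) PySem.Dict.empty).get? (a, b) with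
    | none => rfl
    | some v =>
      have := h1 (a, b) v hq
      exact absurd ⟨this.2.1, this.2.2⟩ hab

-- ===== VERDICT (by name: the statement is the Claim_ definition above) =====
theorem longest_valid_subsequence_spec : Claim_equal_longest_valid_subsequence := by
  intro s _
  unfold Spec_longest_valid_subsequence longest_valid_subsequence longest_valid_subsequence_alt
  have hdp : (fun a b => pvGet2 (pvDpA s.toList) a b)
      = (fun a b => (pvCacheB s.toList).getD (a, b) 0) := by
    funext a b
    rw [pvDpA_eq, pvCacheB_eq]
  simp only [hdp]
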